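-- pv_equiv track=rewrite | github.com/alicemb00/VHacks2020 | hamming.py | find_syndrome
-- ===== SOURCE A (Python) =====
-- def find_syndrome(v, M):    # Find syndrome with word v and parity check matrix M
--     s = []
--     for i in range(len(M[0])):
--         wt = 0
--         for j in range(len(v)):
--             wt += v[j] * M[j][i]
--         s = s + [(wt % 2)]
--     return s
-- ===== SOURCE B (Python) =====
-- def find_syndrome(v, M):
--     # GF(2) view: the syndrome is the XOR of the mod-2 rows of M selected by the
--     # odd entries of v; rows with an even coefficient are skipped entirely.
--     s = [0] * len(M[0])
--     for x, row in zip(v, M):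
--         if x % 2:
--             s = [a ^ (b % 2) for a, b in zip(s, row)]
--     return s
-- ===== Notes on version B (the rewrite author's own statement) =====
-- stated objective: alternative
-- what changed: B works over GF(2): it reduces rows mod 2 and XORs into the syndrome only the rows whose coefficient in v is odd (skipping even coefficients entirely), instead of A's per-column integer dot products with a final mod.
-- outside the precondition, e.g. on find_syndrome([1], []): A raises IndexError, B raises IndexError; on find_syndrome([1, 1], [[1, 0]]): A raises IndexError, B returns [1, 0]; on find_syndrome([1, 1], [[1, 0], [1]]): A raises IndexError, B returns [0]
import Mathlib
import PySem

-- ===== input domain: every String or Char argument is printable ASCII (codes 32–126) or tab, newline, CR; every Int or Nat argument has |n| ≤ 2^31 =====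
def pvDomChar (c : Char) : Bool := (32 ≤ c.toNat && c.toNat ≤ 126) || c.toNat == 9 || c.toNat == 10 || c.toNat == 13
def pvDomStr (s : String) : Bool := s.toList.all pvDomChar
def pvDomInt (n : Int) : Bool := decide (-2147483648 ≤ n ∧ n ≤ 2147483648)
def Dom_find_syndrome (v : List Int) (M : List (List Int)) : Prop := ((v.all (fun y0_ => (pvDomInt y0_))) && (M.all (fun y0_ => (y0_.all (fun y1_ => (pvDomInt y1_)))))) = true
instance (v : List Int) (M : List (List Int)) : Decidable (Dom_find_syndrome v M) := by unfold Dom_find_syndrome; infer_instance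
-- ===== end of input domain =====

-- B computes the syndrome over GF(2): it XORs the mod-2 rows of M selected by the
-- odd entries of v into the result (skipping even coefficients), instead of A's
-- per-column integer dot products with a final mod (alternative algorithm).

-- ===== PORT A =====
def find_syndrome (v : List Int) (M : List (List Int)) : List Int :=
  (PySem.List.pyRange 0 (((PySem.List.pyGetD M 0 []).length : Int)) 1).foldl
    (fun s i =>
      s ++ [PySem.Int.mod
        ((PySem.List.pyRange 0 (v.length : Int) 1).foldl
          (fun wt j =>
            wt + PySem.List.pyGetD v j 0 * PySem.List.pyGetD (PySem.List.pyGetD M j []) i 0)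
          0) 2])
    []

-- ===== PORT B =====
def find_syndrome_alt (v : List Int) (M : List (List Int)) : List Int :=
  (v.zip M).foldl
    (fun s p =>
      if PySem.Int.mod p.1 2 ≠ 0 then
        (s.zip p.2).map (fun q => PySem.Int.bxor q.1 (PySem.Int.mod q.2 2))
      else s)
    (List.replicate (PySem.List.pyGetD M 0 []).length 0)

-- ===== PRECONDITION & SPEC =====
-- Pre_ excludes exactly the inputs on which Python A raises IndexError:
-- M empty, or (when row 0 is non-empty) v longer than M, or a row among the
-- first len(v) rows shorter than row 0.
def Pre_find_syndrome (v : List Int) (M : List (List Int)) : Prop :=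
  M ≠ [] ∧ (M.headI.length = 0 ∨
    (v.length ≤ M.length ∧ ∀ j ∈ List.range v.length, M.headI.length ≤ (M.getD j []).length))
instance (v : List Int) (M : List (List Int)) : Decidable (Pre_find_syndrome v M) := by
  unfold Pre_find_syndrome; infer_instance

def pvWitness_find_syndrome : List Int × List (List Int) :=
  ([1, 0, 1], [[1, 1], [0, 1], [1, 0]])

def Spec_find_syndrome (v : List Int) (M : List (List Int)) (out : List Int) : Prop := out = find_syndrome_alt v M
instance (v : List Int) (M : List (List Int)) (out : List Int) : Decidable (Spec_find_syndrome v M out) := by unfold Spec_find_syndrome; infer_instance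

-- ===== CLAIM (what is proved, stated in full; the proofs are below) =====
def Claim_equal_find_syndrome : Prop := ∀ (v : List Int) (M : List (List Int)), Dom_find_syndrome v M → Pre_find_syndrome v M → Spec_find_syndrome v M (find_syndrome v M)

-- ===== LEMMAS AND PROOFS =====

-- dot of a coefficient/row pair list at column i
def pvDot (ps : List (Int × List Int)) (i : Nat) : Int :=
  (ps.map (fun p => p.1 * p.2.getD i 0)).sum

-- A's inner loop over j is the dot of the zipped prefix (when v.length ≤ M.length)
lemma pvInner_eq (v : List Int) (M : List (List Int)) (i : Nat)
    (h : v.length ≤ M.length) :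
    (PySem.List.pyRange 0 (v.length : Int) 1).foldl
      (fun wt j => wt + PySem.List.pyGetD v j 0 * PySem.List.pyGetD (PySem.List.pyGetD M j []) (i : Int) 0)
      0 = pvDot (v.zip M) i := by
  induction v using List.reverseRecOn with
  | nil => simp [PySem.List.pyRange_one_eq_nil, pvDot]
  | append_singleton xs x ih =>
    have hlen : ((xs ++ [x]).length : Int) = (xs.length : Int) + 1 := by
      simp
    rw [hlen, PySem.List.pyRange_one_succ_right (by positivity), List.foldl_append]
    have hxs : xs.length ≤ M.length := by simp at h; omega
    have hcong :
        (PySem.List.pyRange 0 (xs.length : Int) 1).foldl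
          (fun wt j => wt + PySem.List.pyGetD (xs ++ [x]) j 0 * PySem.List.pyGetD (PySem.List.pyGetD M j []) (i : Int) 0) 0
        = (PySem.List.pyRange 0 (xs.length : Int) 1).foldl
          (fun wt j => wt + PySem.List.pyGetD xs j 0 * PySem.List.pyGetD (PySem.List.pyGetD M j []) (i : Int) 0) 0 := by
      apply PySem.List.foldl_congr_mem
      intro wt j hj
      have hj' := PySem.List.mem_pyRange_one.mp hj
      have h0 : 0 ≤ j := hj'.1
      have hlt : j < (xs.length : Int) := hj'.2
      congr 1
      congr 1
      rw [PySem.List.pyGetD_of_nonneg _ _ h0, PySem.List.pyGetD_of_nonneg _ _ h0]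
      rw [List.getD_append]
      omega
    rw [hcong, ih hxs]
    -- the appended step
    have hxlt : xs.length < M.length := by simp at h; omega
    have hz : (xs ++ [x]).zip M = xs.zip M ++ [(x, M.getD xs.length [])] := by
      apply List.ext_getElem
      · simp; omega
      · intro k hk hk'
        have hkM : k < M.length := by simp at hk; omega
        have hkx : k < xs.length + 1 := by simp at hk; omega
        rw [List.getElem_zip]
        by_cases hkl : k < xs.length
        · rw [List.getElem_append_left (by simpa using hkl)]
          rw [List.getElem_append_left (by rw [List.length_zip]; omega)]
          simp [List.getElem_zip]
        · have hke : k = xs.length := by omega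
          subst hke
          rw [List.getElem_append_right (by simp)]
          rw [List.getElem_append_right (by rw [List.length_zip]; omega)]
          simp [List.getElem?_eq_getElem hkM]
    rw [hz]
    simp only [List.foldl_cons, List.foldl_nil, PySem.List.pyGetD_natCast]
    simp [pvDot]

-- entries of B's accumulator stay bits
def pvIsBits (s : List Int) : Prop := ∀ x ∈ s, x = 0 ∨ x = 1

-- one step of B's fold, on a bit vector of length ≤ row length
lemma pvStep (s : List Int) (x : Int) (row : List Int)
    (hb : pvIsBits s) (hlen : s.length ≤ row.length) :
    (if PySem.Int.mod x 2 ≠ 0 then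
        (s.zip row).map (fun q => PySem.Int.bxor q.1 (PySem.Int.mod q.2 2))
      else s)
    = (List.range s.length).map (fun i => (s.getD i 0 + x * row.getD i 0) % 2) := by
  have hmodx : PySem.Int.mod x 2 = x % 2 := PySem.Int.mod_eq_emod_of_pos (by omega)
  by_cases hx : x % 2 = 0
  · rw [if_neg (by rw [hmodx, hx]; simp)]
    apply List.ext_getElem
    · simp
    · intro k hk hk'
      have hkr : k < row.length := by omega
      simp only [List.getElem_map, List.getElem_range]
      rw [List.getD_eq_getElem s 0 hk, List.getD_eq_getElem row 0 hkr]
      have hbit := hb s[k] (List.getElem_mem hk)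
      have : (s[k] + x * row[k]) % 2 = s[k] % 2 := by
        have h2 : (2 : Int) ∣ x := Int.dvd_of_emod_eq_zero hx
        obtain ⟨c, rfl⟩ := h2
        have : 2 * c * row[k] = 2 * (c * row[k]) := by ring
        rw [this, Int.add_mul_emod_self_left]
      rw [this]
      rcases hbit with h | h <;> simp [h]
  · rw [if_pos (by rw [hmodx]; exact hx)]
    apply List.ext_getElem
    · simp; omega
    · intro k hk hk'
      have hks : k < s.length := by simp at hk; omega
      have hkr : k < row.length := by omega
      simp only [List.getElem_map, List.getElem_zip, List.getElem_range]
      rw [List.getD_eq_getElem s 0 hks, List.getD_eq_getElem row 0 hkr]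
      have hmodr : PySem.Int.mod row[k] 2 = row[k] % 2 :=
        PySem.Int.mod_eq_emod_of_pos (by omega)
      rw [hmodr]
      have hbit := hb s[k] (List.getElem_mem hks)
      have hx1 : x % 2 = 1 := by omega
      have hmul : x * row[k] % 2 = row[k] % 2 := by
        rw [Int.mul_emod, hx1, one_mul, Int.emod_emod_of_dvd _ (dvd_refl 2)]
      have hsum : (s[k] + x * row[k]) % 2 = (s[k] + row[k] % 2) % 2 := by omega
      rw [hsum]
      have hr2 : row[k] % 2 = 0 ∨ row[k] % 2 = 1 := by omega
      rcases hbit with h | h <;> rcases hr2 with h' | h' <;>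
        rw [h, h'] <;> decide

-- B's fold over any pair list whose rows are long enough
lemma pvFold (ps : List (Int × List Int)) :
    ∀ (s : List Int), pvIsBits s → (∀ p ∈ ps, s.length ≤ p.2.length) →
    ps.foldl
      (fun s p =>
        if PySem.Int.mod p.1 2 ≠ 0 then
          (s.zip p.2).map (fun q => PySem.Int.bxor q.1 (PySem.Int.mod q.2 2))
        else s) s
    = (List.range s.length).map (fun i => (s.getD i 0 + pvDot ps i) % 2) := by
  induction ps with
  | nil =>
    intro s hb _
    simp only [List.foldl_nil]
    apply List.ext_getElem
    · simp
    · intro k hk hk'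
      simp only [List.getElem_map, List.getElem_range, pvDot, List.map_nil, List.sum_nil,
        add_zero]
      rw [List.getD_eq_getElem s 0 hk]
      rcases hb s[k] (List.getElem_mem hk) with h | h <;> rw [h] <;> decide
  | cons p ps ih =>
    intro s hb hrow
    rw [List.foldl_cons, pvStep s p.1 p.2 hb (hrow p (by simp))]
    set t := (List.range s.length).map (fun i => (s.getD i 0 + p.1 * p.2.getD i 0) % 2)
      with ht
    have htb : pvIsBits t := by
      intro x hx
      simp only [ht, List.mem_map] at hx
      obtain ⟨i, _, rfl⟩ := hx
      omega
    have htl : t.length = s.length := by simp [ht]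
    rw [ih t htb (by intro q hq; rw [htl]; exact hrow q (by simp [hq]))]
    apply List.ext_getElem
    · simp [htl]
    · intro k hk hk'
      have hks : k < s.length := by simpa [htl] using hk
      simp only [List.getElem_map, List.getElem_range]
      have hgt : t.getD k 0 = (s.getD k 0 + p.1 * p.2.getD k 0) % 2 := by
        rw [List.getD_eq_getElem t 0 (by omega)]
        simp [ht]
      rw [hgt]
      simp only [pvDot, List.map_cons, List.sum_cons]
      omega

theorem find_syndrome_spec : Claim_equal_find_syndrome := by
  intro v M _ hpre
  obtain ⟨hM, hsh⟩ := hpre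
  unfold Spec_find_syndrome find_syndrome find_syndrome_alt
  rw [PySem.List.foldl_append_singleton_eq_map, List.nil_append]
  have hhead : PySem.List.pyGetD M 0 [] = M.headI := by
    cases M with
    | nil => simp at hM
    | cons r rs => simp [PySem.List.pyGetD_zero_cons]
  rw [hhead]
  set n := M.headI.length with hn
  rcases hsh with hz | ⟨hvM, hrows⟩
  · -- n = 0: both sides are []
    have hzip : ∀ p ∈ v.zip M, (List.replicate n 0 : List Int).length ≤ p.2.length := by
      intro p _; simp [hz]
    rw [pvFold (v.zip M) (List.replicate n 0) (by intro x hx; left; simpa using (List.eq_of_mem_replicate hx)) hzip]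
    simp [hz, PySem.List.pyRange_one_eq_nil]
  · -- general case
    have hzip : ∀ p ∈ v.zip M, (List.replicate n 0 : List Int).length ≤ p.2.length := by
      intro p hp
      simp only [List.length_replicate]
      obtain ⟨j, hj, hj2⟩ := List.getElem_of_mem hp
      have hjv : j < v.length := by simp at hj; omega
      have hjM : j < M.length := by omega
      have := hrows j (List.mem_range.mpr hjv)
      rw [List.getD_eq_getElem M [] hjM] at this
      have hp2 : p.2 = M[j] := by
        rw [← hj2]; simp [List.getElem_zip]
      rw [hp2]; exact this
    rw [pvFold (v.zip M) (List.replicate n 0) (by intro x hx; left; simpa using (List.eq_of_mem_replicate hx)) hzip]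
    apply List.ext_getElem
    · simp [PySem.List.length_pyRange_one]
    · intro k hk hk'
      have hkn : k < n := by simpa using hk'
      simp only [List.getElem_map, PySem.List.getElem_pyRange_one, List.getElem_range,
        zero_add]
      rw [pvInner_eq v M k hvM]
      rw [PySem.Int.mod_eq_emod_of_pos (by omega)]
      have : (List.replicate n (0:Int)).getD k 0 = 0 := by
        rw [List.getD_eq_getElem _ 0 (by simpa using hkn)]; simp
      rw [this, zero_add]
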